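-- pv_equiv track=rewrite | github.com/vulture-boy/CPS633_Cryptography | knapsack.py | knapsack_encipher
-- ===== SOURCE A (Python) =====
-- def knapsack_encipher(public_list, binary_str):
--     p_index = 0
--     sum_cipher = 0
--     cipher = []
--     for c in binary_str:
--         if c == " ":    # Skip blanks
--             continue
--         sum_cipher += int(c) * public_list[p_index]  # Add to current sum
--         p_index += 1
--
--         if p_index == len(public_list):  # Repeat for another message
--             p_index = 0
--             cipher.append(sum_cipher)
--             sum_cipher = 0
--     return cipher
-- ===== SOURCE B (Python) =====
-- def knapsack_encipher(public_list, binary_str):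
--     # Filter spaces out first, then cut the cleaned string into complete
--     # blocks of len(public_list) and dot-product each block with the weights.
--     cleaned = [c for c in binary_str if c != " "]
--     n = len(public_list)
--     cipher = []
--     for i in range(0, len(cleaned) - n + 1, n):
--         block = cleaned[i:i + n]
--         cipher.append(sum(int(b) * w for b, w in zip(block, public_list)))
--     return cipher
-- ===== Notes on version B (the rewrite author's own statement) =====
-- stated objective: alternative
-- what changed: Replaces the streaming char-by-char accumulator with modular index state by a filter-then-chunk pass: spaces are removed once, then each complete n-sized block is reduced with a dot product against the weights.
-- outside the precondition, e.g. on knapsack_encipher([], '  '): A returns [], B raises ValueError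
import Mathlib
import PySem

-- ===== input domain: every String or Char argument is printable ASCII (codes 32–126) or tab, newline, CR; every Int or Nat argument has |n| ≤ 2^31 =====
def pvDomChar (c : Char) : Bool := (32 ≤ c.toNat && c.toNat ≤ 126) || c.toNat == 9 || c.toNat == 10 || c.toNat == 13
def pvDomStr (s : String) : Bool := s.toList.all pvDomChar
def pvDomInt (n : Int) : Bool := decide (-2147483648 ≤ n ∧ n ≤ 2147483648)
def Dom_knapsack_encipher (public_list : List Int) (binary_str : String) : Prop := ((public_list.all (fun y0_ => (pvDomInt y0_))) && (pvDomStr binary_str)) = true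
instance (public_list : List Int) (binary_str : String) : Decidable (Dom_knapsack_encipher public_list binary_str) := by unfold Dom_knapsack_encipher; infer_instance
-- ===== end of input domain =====

-- B filters spaces first and reduces complete blocks by dot products, instead of A's
-- streaming accumulator with a modular index; same cost, different decomposition.

-- ===== PORT A =====
-- int(c) is ported as (PySem.Int.ofChars? [c]).getD 0 and public_list[p_index] as
-- PySem.List.pyGetD _ _ 0: the `none`/out-of-range cases are exactly where Python A
-- raises, and Pre_ excludes them.
def knapsack_encipher (public_list : List Int) (binary_str : String) : List Int :=
  (binary_str.toList.foldl
    (fun (st : Int × Int × List Int) (c : Char) =>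
      if c = ' ' then st
      else
        let sum_cipher := st.2.1 + ((PySem.Int.ofChars? [c]).getD 0) * PySem.List.pyGetD public_list st.1 0
        let p_index := st.1 + 1
        if p_index = (public_list.length : Int) then (0, 0, st.2.2 ++ [sum_cipher])
        else (p_index, sum_cipher, st.2.2))
    (0, 0, ([] : List Int))).2.2

-- ===== PORT B =====
-- cleaned[i:i+n] is ported as drop/take: exact since every i produced by the range is ≥ 0.
def knapsack_encipher_alt (public_list : List Int) (binary_str : String) : List Int :=
  let cleaned := binary_str.toList.filter (fun c => c ≠ ' ')
  let n : Int := public_list.length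
  (PySem.List.pyRange 0 ((cleaned.length : Int) - n + 1) n).map
    (fun i =>
      let block := (cleaned.drop i.toNat).take public_list.length
      (block.zip public_list).foldl (fun acc bw => acc + ((PySem.Int.ofChars? [bw.1]).getD 0) * bw.2) 0)

-- ===== PRECONDITION & SPEC =====
-- Pre_ excludes the inputs where Python A raises: a non-space non-digit character makes
-- int(c) raise ValueError, and an empty public_list makes public_list[0] raise IndexError
-- on the first non-space character.  The only inputs excluded on which A still RETURNS are
-- those with public_list = [] and an all-space binary_str (A returns [], B's range(...,0)
-- raises ValueError there) — a degenerate corner B's own algorithm cannot serve.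
def Pre_knapsack_encipher (public_list : List Int) (binary_str : String) : Prop :=
  public_list ≠ [] ∧ binary_str.toList.all (fun c => c == ' ' || c.isDigit) = true
instance (public_list : List Int) (binary_str : String) : Decidable (Pre_knapsack_encipher public_list binary_str) := by unfold Pre_knapsack_encipher; infer_instance

def pvWitness_knapsack_encipher : List Int × String := ([3, 5], "10 1")

def Spec_knapsack_encipher (public_list : List Int) (binary_str : String) (out : List Int) : Prop := out = knapsack_encipher_alt public_list binary_str
instance (public_list : List Int) (binary_str : String) (out : List Int) : Decidable (Spec_knapsack_encipher public_list binary_str out) := by unfold Spec_knapsack_encipher; infer_instance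

-- ===== CLAIM (what is proved, stated in full; the proofs are below) =====
def Claim_equal_knapsack_encipher : Prop := ∀ (public_list : List Int) (binary_str : String), Dom_knapsack_encipher public_list binary_str → Pre_knapsack_encipher public_list binary_str → Spec_knapsack_encipher public_list binary_str (knapsack_encipher public_list binary_str)

-- ===== LEMMAS AND PROOFS =====

-- the per-character value int(c)
def pvF (c : Char) : Int := (PySem.Int.ofChars? [c]).getD 0

-- A's loop body on a non-space character
def pvCore (pl : List Int) (st : Int × Int × List Int) (c : Char) : Int × Int × List Int :=
  let sum_cipher := st.2.1 + pvF c * PySem.List.pyGetD pl st.1 0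
  let p_index := st.1 + 1
  if p_index = (pl.length : Int) then (0, 0, st.2.2 ++ [sum_cipher])
  else (p_index, sum_cipher, st.2.2)

-- B's dot product of a block against weights, seeded with s
def pvDot (ws : List Int) (l : List Char) (s : Int) : Int :=
  (l.zip ws).foldl (fun a bw => a + pvF bw.1 * bw.2) s

-- B's result on an already-cleaned character list
def pvB (pl : List Int) (l : List Char) : List Int :=
  (PySem.List.pyRange 0 ((l.length : Int) - pl.length + 1) pl.length).map
    (fun i => pvDot pl ((l.drop i.toNat).take pl.length) 0)

theorem pvA_eq_filter (pl : List Int) (s : String) :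
    knapsack_encipher pl s
      = ((s.toList.filter (fun c => c ≠ ' ')).foldl (pvCore pl) (0, 0, [])).2.2 := by
  have hfn : (fun (st : Int × Int × List Int) (c : Char) =>
      if c = ' ' then st
      else
        let sum_cipher := st.2.1 + ((PySem.Int.ofChars? [c]).getD 0) * PySem.List.pyGetD pl st.1 0
        let p_index := st.1 + 1
        if p_index = (pl.length : Int) then (0, 0, st.2.2 ++ [sum_cipher])
        else (p_index, sum_cipher, st.2.2))
      = (fun (x : Int × Int × List Int) (y : Char) =>
          if decide (y ≠ ' ') = true then pvCore pl x y else x) := by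
    funext st c
    by_cases h : c = ' ' <;> simp [h, pvCore, pvF]
  unfold knapsack_encipher
  rw [hfn, ← List.foldl_filter]

theorem pvB_eq (pl : List Int) (s : String) :
    knapsack_encipher_alt pl s = pvB pl (s.toList.filter (fun c => c ≠ ' ')) := rfl

theorem pvRange_nil (n b : Int) (hn : 0 < n) (hb : b ≤ 0) :
    PySem.List.pyRange 0 b n = [] := by
  rw [PySem.List.pyRange_of_pos _ _ hn]
  simp [show ¬ (0:Int) < b by omega]

theorem pvRange_cons (n b : Int) (hn : 0 < n) (hb : 0 < b) :
    PySem.List.pyRange 0 b n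
      = 0 :: (PySem.List.pyRange 0 (b - n) n).map (fun i => n + i) := by
  rw [PySem.List.pyRange_of_pos _ _ hn, PySem.List.pyRange_of_pos _ _ hn]
  have hq : (0:Int) ≤ (b - 1) / n := Int.ediv_nonneg (by omega) (by omega)
  have hdiv : (b - 0 + n - 1) / n = (b - 1) / n + 1 := by
    rw [show b - 0 + n - 1 = (b - 1) + 1 * n by ring,
        Int.add_mul_ediv_right _ _ (by omega : n ≠ 0)]
  have hc' : (if 0 < b - n then ((b - n - 0 + n - 1) / n).toNat else 0) = ((b - 1) / n).toNat := by
    by_cases h : 0 < b - n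
    · simp only [if_pos h]; congr 1; congr 1; ring
    · simp only [if_neg h]
      rw [Int.ediv_eq_zero_of_lt (by omega) (by omega)]
      simp
  rw [if_pos (by omega : (0:Int) < b), hdiv, hc',
      show ((b - 1) / n + 1).toNat = ((b - 1) / n).toNat + 1 by omega,
      List.range_succ_eq_map]
  simp only [List.map_cons, List.map_map]
  congr 1
  · simp
  · apply List.map_congr_left
    intro k _
    simp only [Function.comp_apply, Nat.succ_eq_add_one]
    push_cast
    ring

-- a run shorter than a full block never touches the output list
theorem pvPartial (pl : List Int) :
    ∀ (l : List Char) (p : Nat) (s : Int) (cip : List Int),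
      p + l.length < pl.length →
      ∃ s', l.foldl (pvCore pl) ((p : Int), s, cip) = (((p + l.length : Nat) : Int), s', cip) := by
  intro l
  induction l with
  | nil => intro p s cip _; exact ⟨s, by simp⟩
  | cons c t ih =>
    intro p s cip h
    simp only [List.foldl_cons]
    have hne : ((p : Int) + 1) ≠ (pl.length : Int) := by
      have : p + 1 < pl.length := by simp at h; omega
      omega
    simp only [pvCore, if_neg hne]
    have h' : (p + 1) + t.length < pl.length := by simp at h; omega
    obtain ⟨s', hs'⟩ := ih (p + 1) (s + pvF c * PySem.List.pyGetD pl (↑p) 0) cip h'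
    refine ⟨s', ?_⟩
    rw [show ((p : Int) + 1) = ((p + 1 : Nat) : Int) by omega, hs']
    congr 2
    simp; omega

-- completing exactly one block appends its dot product and resets the state
theorem pvBlock (pl : List Int) :
    ∀ (l : List Char) (p : Nat) (s : Int) (cip : List Int),
      p + l.length = pl.length → l ≠ [] →
      l.foldl (pvCore pl) ((p : Int), s, cip) = (0, 0, cip ++ [pvDot (pl.drop p) l s]) := by
  intro l
  induction l with
  | nil => intro p s cip _ hne; exact absurd rfl hne
  | cons c t ih =>
    intro p s cip hlen _
    have hp : p < pl.length := by simp at hlen; omega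
    have hget : PySem.List.pyGetD pl (p : Int) 0 = pl[p] :=
      PySem.List.pyGetD_eq_getElem pl 0 (by positivity) (by exact_mod_cast hp)
    have hdrop : pl.drop p = pl[p] :: pl.drop (p + 1) := List.drop_eq_getElem_cons hp
    simp only [List.foldl_cons, pvCore, hget]
    rcases Decidable.em (t = []) with ht | ht
    · subst ht
      have heq : ((p : Int) + 1) = (pl.length : Int) := by simp at hlen; omega
      simp only [if_pos heq, List.foldl_nil]
      rw [pvDot, hdrop]
      simp only [List.zip_cons_cons, List.zip_nil_left, List.foldl_cons, List.foldl_nil]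
    · have hne : ((p : Int) + 1) ≠ (pl.length : Int) := by
        have : t.length ≠ 0 := fun h => ht (List.eq_nil_of_length_eq_zero h)
        simp at hlen; omega
      simp only [if_neg hne]
      rw [show ((p : Int) + 1) = ((p + 1 : Nat) : Int) by omega]
      rw [ih (p + 1) (s + pvF c * pl[p]) cip (by simp at hlen ⊢; omega) ht]
      rw [pvDot, pvDot, hdrop]
      simp only [List.zip_cons_cons, List.foldl_cons]

-- B's block list decomposes as head block :: blocks of the rest
theorem pvB_step (pl : List Int) (l : List Char) (hn : pl ≠ [])
    (hL : pl.length ≤ l.length) :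
    pvB pl l = pvDot pl (l.take pl.length) 0 :: pvB pl (l.drop pl.length) := by
  have hn0 : 0 < pl.length := List.length_pos_iff.mpr hn
  have hn' : (0:Int) < pl.length := by exact_mod_cast hn0
  have hb : (0:Int) < (l.length : Int) - pl.length + 1 := by
    have : (pl.length : Int) ≤ (l.length : Int) := by exact_mod_cast hL
    omega
  unfold pvB
  rw [pvRange_cons _ _ hn' hb, List.map_cons, List.map_map]
  congr 1
  have hR : ((l.length : Int) - ↑pl.length + 1 - ↑pl.length)
        = ((l.length - pl.length : Nat) : Int) - ↑pl.length + 1 := by omega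
  rw [hR]
  simp only [List.length_drop]
  apply List.map_congr_left
  intro i hi
  have h0i : 0 ≤ i := ((PySem.List.mem_pyRange_iff_of_pos hn' i).mp hi).1
  simp only [Function.comp_apply]
  have ht : ((pl.length : Int) + i).toNat = pl.length + i.toNat := by omega
  rw [ht, ← List.drop_drop]

-- main loop invariant: A's fold over the cleaned list produces exactly B's blocks
theorem pvMain (pl : List Int) (hn : pl ≠ []) :
    ∀ (L : Nat) (l : List Char), l.length ≤ L → ∀ (cip : List Int),
      (l.foldl (pvCore pl) (0, 0, cip)).2.2 = cip ++ pvB pl l := by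
  have hn0 : 0 < pl.length := List.length_pos_iff.mpr hn
  intro L
  induction L with
  | zero =>
    intro l hl cip
    have hnil : l = [] := List.eq_nil_of_length_eq_zero (by omega)
    subst hnil
    have hB : pvB pl [] = [] := by
      unfold pvB
      rw [pvRange_nil _ _ (by exact_mod_cast hn0) (by simp; omega)]
      simp
    simp [hB]
  | succ L ih =>
    intro l hl cip
    rcases Nat.lt_or_ge l.length pl.length with hlt | hge
    · obtain ⟨s', hs'⟩ := pvPartial pl l 0 0 cip (by omega)
      rw [Nat.cast_zero] at hs'
      rw [hs']
      have hB : pvB pl l = [] := by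
        unfold pvB
        rw [pvRange_nil _ _ (by exact_mod_cast hn0) (by omega)]
        simp
      simp [hB]
    · have hb0 := pvBlock pl (l.take pl.length) 0 0 cip
        (by simp; omega)
        (by
          have hlt : (l.take pl.length).length = pl.length := by simp; omega
          intro h
          rw [h] at hlt
          simp at hlt
          omega)
      rw [Nat.cast_zero] at hb0
      conv_lhs => rw [← List.take_append_drop pl.length l]
      rw [List.foldl_append, hb0]
      simp only [List.drop_zero] at *
      rw [ih (l.drop pl.length) (by simp; omega) _]
      rw [pvB_step pl l hn hge]
      simp

-- ===== VERDICT (by name: the statement is the Claim_ definition above) =====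
theorem knapsack_encipher_spec : Claim_equal_knapsack_encipher := by
  intro pl s _ hpre
  unfold Spec_knapsack_encipher
  rw [pvA_eq_filter, pvB_eq]
  exact pvMain pl hpre.1 _ _ (le_refl _) []
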